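-- pv_equiv track=rewrite | github.com/sinhasagar507/nlu-data-preprocessing | nlu-project-data/src/features/build_heuristic_features.py | group_ref_cnt
-- ===== SOURCE A (Python) =====
-- def group_ref_cnt(utt: str) -> int:  # Include all third-party pronouns as well
--     """
--
--     Args:
--
--     Returns:
--
--     """
--     cnt_group_ref = 0
--     words = utt.lower().split()
--     group_ref = ["we", "our", "ours", "ourselves", "us", "they", "them", "themselves", "their", "theirs",
--                  "everyone", "everybody"]  # More of it to be included here. Self-referencing pronouns
--
--     for word in words:
--         if word in group_ref:
--             cnt_group_ref += 1
--     return cnt_group_ref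
-- ===== SOURCE B (Python) =====
-- def group_ref_cnt(utt: str) -> int:  # Include all third-party pronouns as well
--     """
--
--     Args:
--
--     Returns:
--
--     """
--     pronouns = "we our ours ourselves us they them themselves their theirs everyone everybody".split()
--     words = utt.lower().split()
--     return sum(words.count(p) for p in pronouns)
-- ===== Notes on version B (the rewrite author's own statement) =====
-- stated objective: alternative
-- what changed: A scans each word and tests membership in the pronoun list; B inverts the traversal: it derives the pronoun list by splitting a single literal and sums words.count(p) over the 12 pronouns, with no per-word membership test.
import Mathlib
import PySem

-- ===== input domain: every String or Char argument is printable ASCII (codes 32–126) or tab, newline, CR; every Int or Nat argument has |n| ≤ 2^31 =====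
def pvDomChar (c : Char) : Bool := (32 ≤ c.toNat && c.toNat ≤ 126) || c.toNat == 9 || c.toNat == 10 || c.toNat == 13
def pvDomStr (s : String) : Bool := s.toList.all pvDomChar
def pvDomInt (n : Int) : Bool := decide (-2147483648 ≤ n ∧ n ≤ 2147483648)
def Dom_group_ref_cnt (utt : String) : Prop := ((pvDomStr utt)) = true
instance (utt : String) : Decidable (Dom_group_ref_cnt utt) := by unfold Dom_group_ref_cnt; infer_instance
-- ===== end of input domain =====

-- B inverts the traversal: it derives the pronoun list from one literal string and
-- sums words.count(p) over the 12 pronouns, instead of A's per-word membership scan.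

-- ===== PORT A =====
def groupRefA : List String :=
  ["we", "our", "ours", "ourselves", "us", "they", "them", "themselves", "their", "theirs",
   "everyone", "everybody"]

def group_ref_cnt (utt : String) : Int :=
  let words := PySem.Str.split₀ (PySem.Str.lower utt)
  words.foldl (fun cnt word => if groupRefA.contains word then cnt + 1 else cnt) 0

-- ===== PORT B =====
def groupRefB : List String :=
  PySem.Str.split₀ "we our ours ourselves us they them themselves their theirs everyone everybody"

def group_ref_cnt_alt (utt : String) : Int :=
  let words := PySem.Str.split₀ (PySem.Str.lower utt)
  (groupRefB.map (fun p => ((words.count p : Nat) : Int))).sum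

-- ===== PRECONDITION & SPEC =====
def Spec_group_ref_cnt (utt : String) (out : Int) : Prop := out = group_ref_cnt_alt utt
instance (utt : String) (out : Int) : Decidable (Spec_group_ref_cnt utt out) := by unfold Spec_group_ref_cnt; infer_instance

-- ===== CLAIM (what is proved, stated in full; the proofs are below) =====
def Claim_equal_group_ref_cnt : Prop := ∀ (utt : String), Dom_group_ref_cnt utt → Spec_group_ref_cnt utt (group_ref_cnt utt)

-- ===== LEMMAS AND PROOFS =====

-- on a duplicate-free list G, summing the 0/1 indicator of each element hitting w
-- is exactly the membership test of w in G
theorem sum_indicator_eq_contains (G : List String) (hG : G.Nodup) (w : String) :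
    (G.map (fun p => if w == p then (1 : Int) else 0)).sum
      = if w ∈ G then 1 else 0 := by
  induction G with
  | nil => simp
  | cons g G ih =>
    rcases List.nodup_cons.mp hG with ⟨hg, hG'⟩
    rw [List.map_cons, List.sum_cons, ih hG']
    by_cases h : w = g
    · subst h; simp [hg]
    · have hb : (w == g) = false := by simp [h]
      simp [hb, h]

-- for duplicate-free G, the sum of per-pronoun counts over ws equals the
-- count of words of ws that lie in G
theorem sum_counts_eq_countP (G : List String) (hG : G.Nodup) (ws : List String) :
    (G.map (fun p => ((ws.count p : Nat) : Int))).sum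
      = ((ws.countP (fun w => G.contains w) : Nat) : Int) := by
  induction ws with
  | nil => simp
  | cons w ws ih =>
    have hsplit :
        (G.map (fun p => (((w :: ws).count p : Nat) : Int))).sum
          = (G.map (fun p => ((ws.count p : Nat) : Int))).sum
            + (G.map (fun p => if w == p then (1 : Int) else 0)).sum := by
      rw [← PySem.List.sum_map_add_int]
      apply congrArg List.sum
      apply List.map_congr_left
      intro p _
      by_cases h : w = p
      · simp [h]
      · simp [h]
    rw [hsplit, ih, sum_indicator_eq_contains G hG w, List.countP_cons]
    push_cast
    by_cases h : w ∈ G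
    · simp [h]
    · simp [h]

-- B's pronoun list (split of one literal) is exactly A's explicit list
theorem groupRefB_eq : groupRefB = groupRefA := by decide

-- ===== VERDICT (by name: the statement is the Claim_ definition above) =====
theorem group_ref_cnt_spec : Claim_equal_group_ref_cnt := by
  intro utt _
  show group_ref_cnt utt = group_ref_cnt_alt utt
  unfold group_ref_cnt group_ref_cnt_alt
  generalize PySem.Str.split₀ (PySem.Str.lower utt) = ws
  rw [PySem.List.foldl_count_if (fun word => groupRefA.contains word) ws 0]
  rw [groupRefB_eq, sum_counts_eq_countP groupRefA (by decide) ws]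
  simp
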